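-- pv_equiv track=rewrite | github.com/richie-p-meyer/league | modeling.py | near_split
-- ===== SOURCE A (Python) =====
-- def near_split(x, num_bins): #Split my df into equal splits to perform backtesting
--     quotient, remainder = divmod(x, num_bins)
--     bins = [quotient + 1] * remainder + [quotient] * (num_bins - remainder)
--     count = 0
--     new_list = []
--     for b in bins:
--         count += b
--         new_list.append(count)
--     return new_list
-- ===== SOURCE B (Python) =====
-- def near_split(x, num_bins):
--     quotient, remainder = divmod(x, num_bins)
--     return [(i + 1) * quotient + min(i + 1, remainder) for i in range(num_bins)]
-- ===== Notes on version B (the rewrite author's own statement) =====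
-- stated objective: simpler
-- what changed: Replaces the intermediate bins list and the running-count accumulator loop with a stateless list comprehension computing each cumulative value by the closed form (i+1)*quotient + min(i+1, remainder).
import Mathlib
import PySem

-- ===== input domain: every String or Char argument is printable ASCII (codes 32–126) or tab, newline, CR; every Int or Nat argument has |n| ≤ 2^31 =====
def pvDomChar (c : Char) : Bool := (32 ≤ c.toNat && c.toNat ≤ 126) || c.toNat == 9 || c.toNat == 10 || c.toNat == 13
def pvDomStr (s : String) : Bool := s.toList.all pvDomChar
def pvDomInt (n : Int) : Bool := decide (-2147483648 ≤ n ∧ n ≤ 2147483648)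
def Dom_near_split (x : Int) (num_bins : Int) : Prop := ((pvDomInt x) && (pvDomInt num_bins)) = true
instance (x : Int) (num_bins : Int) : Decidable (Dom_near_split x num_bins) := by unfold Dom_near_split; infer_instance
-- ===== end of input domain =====

-- B replaces A's bins list + running-count loop with a stateless per-index closed form; objective: simpler.

-- ===== PORT A =====
-- literal port of A: divmod, build the bins list ([q+1]*r ++ [q]*(n-r), Python's
-- list repetition clamps negative counts to 0, hence .toNat), then the
-- accumulating loop appending the running count.
def near_split (x : Int) (num_bins : Int) : List Int :=
  match PySem.Int.divmod? x num_bins with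
  | none => []   -- unreachable under Pre_ (num_bins = 0 raises ZeroDivisionError)
  | some (quotient, remainder) =>
    let bins : List Int :=
      List.replicate remainder.toNat (quotient + 1) ++
      List.replicate (num_bins - remainder).toNat quotient
    (bins.foldl (fun (st : Int × List Int) b => (st.1 + b, st.2 ++ [st.1 + b])) (0, [])).2

-- ===== PORT B =====
-- literal port of B: divmod, then a comprehension over range(num_bins) with the closed form.
def near_split_alt (x : Int) (num_bins : Int) : List Int :=
  match PySem.Int.divmod? x num_bins with
  | none => []   -- unreachable under Pre_
  | some (quotient, remainder) =>
    (PySem.List.pyRange 0 num_bins 1).map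
      (fun i => (i + 1) * quotient + min (i + 1) remainder)

-- ===== PRECONDITION & SPEC =====
-- num_bins = 0 makes divmod raise ZeroDivisionError in both A and B.
def Pre_near_split (x : Int) (num_bins : Int) : Prop := num_bins ≠ 0
instance (x : Int) (num_bins : Int) : Decidable (Pre_near_split x num_bins) := by unfold Pre_near_split; infer_instance
def pvWitness_near_split : Int × Int := (10, 3)

def Spec_near_split (x : Int) (num_bins : Int) (out : List Int) : Prop := out = near_split_alt x num_bins
instance (x : Int) (num_bins : Int) (out : List Int) : Decidable (Spec_near_split x num_bins out) := by unfold Spec_near_split; infer_instance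

-- ===== CLAIM (what is proved, stated in full; the proofs are below) =====
def Claim_equal_near_split : Prop := ∀ (x : Int) (num_bins : Int), Dom_near_split x num_bins → Pre_near_split x num_bins → Spec_near_split x num_bins (near_split x num_bins)

-- ===== LEMMAS AND PROOFS =====

-- the cumulative-sum list A's loop produces
def pvCum : List Int → Int → List Int
  | [], _ => []
  | b :: bs, c => (c + b) :: pvCum bs (c + b)

theorem pvFoldl_cum (l : List Int) (c : Int) (acc : List Int) :
    (l.foldl (fun (st : Int × List Int) b => (st.1 + b, st.2 ++ [st.1 + b])) (c, acc)).2
      = acc ++ pvCum l c := by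
  induction l generalizing c acc with
  | nil => simp [pvCum]
  | cons b bs ih => simp [pvCum, List.foldl_cons, ih]

theorem pvCum_append (l1 l2 : List Int) (c : Int) :
    pvCum (l1 ++ l2) c = pvCum l1 c ++ pvCum l2 (c + l1.sum) := by
  induction l1 generalizing c with
  | nil => simp [pvCum]
  | cons b bs ih => simp [pvCum, ih]; ring_nf

theorem pvCum_replicate (a : Nat) (q c : Int) :
    pvCum (List.replicate a q) c = (List.range a).map (fun (i : Nat) => c + ((i : Int) + 1) * q) := by
  induction a generalizing c with
  | zero => simp [pvCum]
  | succ n ih =>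
    rw [List.replicate_succ, List.range_succ_eq_map]
    simp only [pvCum, ih, List.map_cons, List.map_map, List.cons.injEq]
    refine ⟨by push_cast; ring, ?_⟩
    apply List.map_congr_left
    intro i _
    simp only [Function.comp]
    push_cast
    ring

theorem near_split_spec : Claim_equal_near_split := by
  intro x n _ hn
  unfold Pre_near_split at hn
  unfold Spec_near_split near_split near_split_alt
  simp only [PySem.Int.divmod?, if_neg hn]
  set r := x.fmod n with hr
  have hb1 : 0 < n → 0 ≤ r ∧ r < n := fun h => ⟨PySem.Int.mod_nonneg x h, PySem.Int.mod_lt x h⟩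
  have hb2 : n < 0 → n < r ∧ r ≤ 0 := fun h => PySem.Int.mod_neg_bounds x h
  clear_value r
  rw [pvFoldl_cum, List.nil_append, pvCum_append, pvCum_replicate, pvCum_replicate,
    PySem.List.pyRange_one]
  rcases lt_or_gt_of_ne hn with hneg | hpos
  · -- num_bins < 0 : both sides are empty
    have h12 : n < r ∧ r ≤ 0 := hb2 hneg
    have e1 : r.toNat = 0 := by omega
    have e2 : (n - r).toNat = 0 := by omega
    have e3 : (n - 0).toNat = 0 := by omega
    rw [e1, e2, e3]
    simp
  · -- 0 < num_bins
    obtain ⟨hr0, hrn⟩ := hb1 hpos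
    have hsplit : (n - 0).toNat = r.toNat + (n - r).toNat := by omega
    rw [hsplit, List.range_add, List.map_append, List.map_append, List.map_map, List.map_map,
      List.map_map]
    congr 1
    · -- the first r bins (size quotient + 1)
      apply List.map_congr_left
      intro i hi
      rw [List.mem_range] at hi
      simp only [Function.comp_apply, zero_add]
      rw [min_eq_left (by omega)]
      ring
    · -- the remaining bins (size quotient)
      have hsum : (List.replicate r.toNat (x.fdiv n + 1)).sum = r * (x.fdiv n + 1) := by
        simp [List.sum_replicate, Int.toNat_of_nonneg hr0]
      apply List.map_congr_left
      intro i _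
      simp only [Function.comp_apply, zero_add, hsum]
      rw [min_eq_right (by push_cast; omega)]
      push_cast [Int.toNat_of_nonneg hr0]
      ring
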